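-- pv_equiv track=rewrite | github.com/Nand24/Adobe-hackathon-Round-1B | src/round1b/persona_processor.py | _extract_expertise_level
-- ===== SOURCE A (Python) =====
-- def _extract_expertise_level(persona: str) -> str:
--     """Extract expertise level from persona description"""
--     persona_lower = persona.lower()
--
--     if any(term in persona_lower for term in ["phd", "doctor", "professor", "senior", "expert", "lead"]):
--         return "expert"
--     elif any(term in persona_lower for term in ["master", "graduate", "experienced", "analyst"]):
--         return "intermediate"
--     elif any(term in persona_lower for term in ["student", "undergraduate", "beginner", "junior"]):
--         return "beginner"
--     else:
--         return "intermediate"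
-- ===== SOURCE B (Python) =====
-- def _extract_expertise_level(persona: str) -> str:
--     """Extract expertise level from persona description (priority-rank formulation)."""
--     persona_lower = persona.lower()
--     levels = ["expert", "intermediate", "beginner"]
--     groups = [
--         (0, ["phd", "doctor", "professor", "senior", "expert", "lead"]),
--         (2, ["student", "undergraduate", "beginner", "junior"]),
--         (1, ["master", "graduate", "experienced", "analyst"]),
--     ]
--     rank = min((r for r, terms in groups if any(t in persona_lower for t in terms)), default=1)
--     return levels[rank]
-- ===== Notes on version B (the rewrite author's own statement) =====
-- stated objective: alternative
-- what changed: Replaces the short-circuit if/elif cascade with a collect-then-select pass: every term group is scanned, the ranks of all matching groups are gathered, and the answer is the level of the minimum matching rank (default rank 1).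
import Mathlib
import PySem

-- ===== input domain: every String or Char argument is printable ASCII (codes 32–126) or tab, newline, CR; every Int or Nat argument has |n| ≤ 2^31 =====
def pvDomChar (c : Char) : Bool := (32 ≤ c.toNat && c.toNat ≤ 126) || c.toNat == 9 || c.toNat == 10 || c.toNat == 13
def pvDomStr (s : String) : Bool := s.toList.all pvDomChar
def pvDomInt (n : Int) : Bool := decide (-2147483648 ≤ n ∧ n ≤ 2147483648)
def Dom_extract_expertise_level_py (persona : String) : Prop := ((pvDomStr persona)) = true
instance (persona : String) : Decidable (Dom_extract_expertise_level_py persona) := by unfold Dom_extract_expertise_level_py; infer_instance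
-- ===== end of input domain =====

-- B replaces A's short-circuit if/elif cascade by collecting the ranks of all matching term groups and selecting the minimum (default 1): an alternative decomposition, same cost.


-- ===== PORT A =====
def extract_expertise_level_py (persona : String) : String :=
  let persona_lower := PySem.Str.lower persona
  if (["phd", "doctor", "professor", "senior", "expert", "lead"]).any (fun t => PySem.Str.isIn t persona_lower) then "expert"
  else if (["master", "graduate", "experienced", "analyst"]).any (fun t => PySem.Str.isIn t persona_lower) then "intermediate"
  else if (["student", "undergraduate", "beginner", "junior"]).any (fun t => PySem.Str.isIn t persona_lower) then "beginner"
  else "intermediate"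

-- ===== PORT B =====
def extract_expertise_level_py_alt (persona : String) : String :=
  let persona_lower := PySem.Str.lower persona
  let levels := ["expert", "intermediate", "beginner"]
  let groups : List (Nat × List String) :=
    [(0, ["phd", "doctor", "professor", "senior", "expert", "lead"]),
     (2, ["student", "undergraduate", "beginner", "junior"]),
     (1, ["master", "graduate", "experienced", "analyst"])]
  let matched := groups.filterMap (fun g => if g.2.any (fun t => PySem.Str.isIn t persona_lower) then some g.1 else none)
  let rank := matched.min?.getD 1      -- min(…, default=1)
  levels.getD rank "intermediate"      -- levels[rank]; rank ∈ {0,1,2} so indexing never raises; exact for Python here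

-- ===== PRECONDITION & SPEC =====
def Spec_extract_expertise_level_py (persona : String) (out : String) : Prop := out = extract_expertise_level_py_alt persona
instance (persona : String) (out : String) : Decidable (Spec_extract_expertise_level_py persona out) := by unfold Spec_extract_expertise_level_py; infer_instance

-- ===== CLAIM (what is proved, stated in full; the proofs are below) =====
def Claim_equal_extract_expertise_level_py : Prop := ∀ (persona : String), Dom_extract_expertise_level_py persona → Spec_extract_expertise_level_py persona (extract_expertise_level_py persona)

-- ===== LEMMAS AND PROOFS =====

-- ===== VERDICT (by name: the statement is the Claim_ definition above) =====
theorem extract_expertise_level_py_spec : Claim_equal_extract_expertise_level_py := by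
  intro persona _
  unfold Spec_extract_expertise_level_py extract_expertise_level_py extract_expertise_level_py_alt
  cases h0 : (["phd", "doctor", "professor", "senior", "expert", "lead"]).any (fun t => PySem.Str.isIn t (PySem.Str.lower persona)) <;>
  cases h1 : (["master", "graduate", "experienced", "analyst"]).any (fun t => PySem.Str.isIn t (PySem.Str.lower persona)) <;>
  cases h2 : (["student", "undergraduate", "beginner", "junior"]).any (fun t => PySem.Str.isIn t (PySem.Str.lower persona)) <;>
  simp only [h0, h1, h2, List.filterMap, List.min?, Bool.false_eq_true, ite_true, ite_false] <;> rfl
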